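-- pv_equiv track=rewrite | github.com/KaterinaMutafova/SoftUni | Python Advanced/10. Exam_preparation/Exam_ex1_24_10_2020.py | get_the_shortest_job
-- ===== SOURCE A (Python) =====
-- def get_the_shortest_job(list_j):
--     shortest_j = list_j[0]
--     index_shortest_j = 0
--     for index in range(len(list_j)):
--         if list_j[index] < shortest_j and list_j[index] != 0:
--             shortest_j = list_j[index]
--             index_shortest_j = index
--         elif list_j[index] == shortest_j:
--             if index < index_shortest_j:
--                 shortest_j = list_j[index]
--                 index_shortest_j = index
--         elif shortest_j == 0:
--             shortest_j = list_j[index]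
--             index_shortest_j = index
--     return shortest_j, index_shortest_j
-- ===== SOURCE B (Python) =====
-- def get_the_shortest_job(list_j):
--     nonzeros = [v for v in list_j if v != 0]
--     if not nonzeros:
--         return list_j[0], 0
--     m = min(nonzeros)
--     return m, list_j.index(m)
-- ===== Notes on version B (the rewrite author's own statement) =====
-- stated objective: simpler
-- what changed: A's single fused scan that tracks the running nonzero minimum and its index (with a dead 'earlier index' branch) is replaced by a three-step decomposition: filter out zeros, take min() of the remainder, then list.index() to locate its first occurrence.
import Mathlib
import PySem

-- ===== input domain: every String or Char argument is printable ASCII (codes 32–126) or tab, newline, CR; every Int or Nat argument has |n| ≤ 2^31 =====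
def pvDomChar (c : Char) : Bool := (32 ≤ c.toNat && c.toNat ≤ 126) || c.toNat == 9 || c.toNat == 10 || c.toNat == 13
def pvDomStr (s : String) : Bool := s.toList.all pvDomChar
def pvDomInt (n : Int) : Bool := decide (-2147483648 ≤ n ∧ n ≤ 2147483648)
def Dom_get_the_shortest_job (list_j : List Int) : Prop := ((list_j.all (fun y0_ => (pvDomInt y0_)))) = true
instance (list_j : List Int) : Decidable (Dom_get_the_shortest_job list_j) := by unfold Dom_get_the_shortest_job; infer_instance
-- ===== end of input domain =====

-- B replaces A's single fused min-and-index scan by a plain decomposition: filter the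
-- nonzero values, take their minimum, then locate its first index (objective: simpler).

-- ===== PORT A =====
-- loop body of A: one iteration of 'for index in range(len(list_j))'
def aStep (st : Int × Int) (index v : Int) : Int × Int :=
  if v < st.1 ∧ v ≠ 0 then (v, index)
  else if v = st.1 then (if index < st.2 then (v, index) else st)
  else if st.1 = 0 then (v, index)
  else st

-- list_j[0] and list_j[index] are ported with pyGetD: the default is unreachable
-- (Pre_ excludes the empty list, and every loop index is in range)
def get_the_shortest_job (list_j : List Int) : Int × Int :=
  (PySem.List.pyRange 0 list_j.length 1).foldl
    (fun st index => aStep st index (PySem.List.pyGetD list_j index 0))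
    (PySem.List.pyGetD list_j 0 0, 0)

-- ===== PORT B =====
def get_the_shortest_job_alt (list_j : List Int) : Int × Int :=
  let nonzeros := list_j.filter (fun v => decide (v ≠ 0))
  if nonzeros = [] then
    (PySem.List.pyGetD list_j 0 0, 0)     -- list_j[0]; nonempty by Pre_
  else
    let m := PySem.List.minD nonzeros id 0   -- min(nonzeros); nonzeros ≠ [] here
    (m, ((PySem.List.index? list_j m).getD 0 : Nat))  -- list_j.index(m); m ∈ list_j here

-- ===== PRECONDITION & SPEC =====
-- A raises IndexError on the empty list (list_j[0]); B raises there too.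
def Pre_get_the_shortest_job (list_j : List Int) : Prop := list_j ≠ []
instance (list_j : List Int) : Decidable (Pre_get_the_shortest_job list_j) := by
  unfold Pre_get_the_shortest_job; infer_instance

def pvWitness_get_the_shortest_job : List Int := [3, 1, 0, 1, 2]

def Spec_get_the_shortest_job (list_j : List Int) (out : Int × Int) : Prop := out = get_the_shortest_job_alt list_j
instance (list_j : List Int) (out : Int × Int) : Decidable (Spec_get_the_shortest_job list_j out) := by unfold Spec_get_the_shortest_job; infer_instance

-- ===== CLAIM (what is proved, stated in full; the proofs are below) =====
def Claim_equal_get_the_shortest_job : Prop := ∀ (list_j : List Int), Dom_get_the_shortest_job list_j → Pre_get_the_shortest_job list_j → Spec_get_the_shortest_job list_j (get_the_shortest_job list_j)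

-- ===== LEMMAS AND PROOFS =====

-- reference value: the minimum nonzero value of ys and its first index in ys (none if all zero)
def bspec : List Int → Option (Int × Nat)
  | [] => none
  | v :: tl =>
    match bspec tl with
    | none => if v ≠ 0 then some (v, 0) else none
    | some (m, j) => if v ≠ 0 ∧ v ≤ m then some (v, 0) else some (m, j + 1)

lemma bspec_none_iff (ys : List Int) :
    bspec ys = none ↔ ∀ a ∈ ys, a = 0 := by
  induction ys with
  | nil => simp [bspec]
  | cons v tl ih =>
    rw [bspec]
    cases htl : bspec tl with
    | none =>
      have hall : ∀ a ∈ tl, a = 0 := ih.mp htl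
      by_cases hv : v = 0
      · simp only [hv, ne_eq, not_true_eq_false, if_false]
        simpa using hall
      · simp [hv]
    | some p =>
      obtain ⟨m, j⟩ := p
      have hx : ∃ x ∈ tl, x ≠ 0 := by
        by_contra hcon
        simp only [not_exists, not_and, ne_eq, not_not] at hcon
        rw [ih.mpr hcon] at htl
        simp at htl
      obtain ⟨x, hxmem, hx0⟩ := hx
      by_cases hv : v = 0 <;> by_cases hvm : v ≤ m <;>
        simp [hv, hvm] <;> exact ⟨x, hxmem, hx0⟩

lemma bspec_some (ys : List Int) (m : Int) (j : Nat) (h : bspec ys = some (m, j)) :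
    m ≠ 0 ∧ m ∈ ys ∧ (∀ x ∈ ys, x ≠ 0 → m ≤ x) ∧
      PySem.List.index? ys m = some j := by
  induction ys generalizing m j with
  | nil => simp [bspec] at h
  | cons v tl ih =>
    rw [bspec] at h
    cases htl : bspec tl with
    | none =>
      simp only [htl] at h
      have hall : ∀ a ∈ tl, a = 0 := (bspec_none_iff tl).mp htl
      by_cases hv : v = 0
      · simp [hv] at h
      · rw [if_pos hv, Option.some_inj, Prod.ext_iff] at h
        obtain ⟨hm, hj⟩ := h
        subst hm; subst hj
        refine ⟨hv, List.mem_cons_self, ?_, PySem.List.index?_cons_self v tl⟩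
        intro x hx hx0
        rcases List.mem_cons.mp hx with h1 | h1
        · omega
        · exact absurd (hall x h1) hx0
    | some p =>
      obtain ⟨m', j'⟩ := p
      simp only [htl] at h
      obtain ⟨hm0', hmem', hlb', hidx'⟩ := ih m' j' htl
      by_cases hc : v ≠ 0 ∧ v ≤ m'
      · rw [if_pos hc, Option.some_inj, Prod.ext_iff] at h
        obtain ⟨hm, hj⟩ := h
        subst hm; subst hj
        refine ⟨hc.1, List.mem_cons_self, ?_, PySem.List.index?_cons_self v tl⟩
        intro x hx hx0
        rcases List.mem_cons.mp hx with h1 | h1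
        · omega
        · exact le_trans hc.2 (hlb' x h1 hx0)
      · rw [if_neg hc, Option.some_inj, Prod.ext_iff] at h
        obtain ⟨hm, hj⟩ := h
        subst hm; subst hj
        have hvne : v ≠ m' := by
          by_cases hv : v = 0
          · subst hv; exact fun e => hm0' e.symm
          · intro e; exact hc ⟨hv, le_of_eq e⟩
        refine ⟨hm0', List.mem_cons_of_mem _ hmem', ?_, ?_⟩
        · intro x hx hx0
          rcases List.mem_cons.mp hx with h1 | h1
          · subst h1
            have : ¬ x ≤ m' := fun hle => hc ⟨hx0, hle⟩
            omega
          · exact hlb' x h1 hx0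
        · rw [PySem.List.index?_cons_of_ne tl hvne, hidx']
          simp

-- A's loop over the tail, started in a nonzero state (s, i) with i < k
lemma aloop_nonzero (ys : List Int) :
    ∀ (k s i : Int), s ≠ 0 → i < k →
      (PySem.List.enumerate ys k).foldl (fun st p => aStep st p.1 p.2) (s, i) =
        (match bspec ys with
         | none => (s, i)
         | some (m, j) => if s ≤ m then (s, i) else (m, k + (j : Int))) := by
  induction ys with
  | nil => intro k s i _ _; simp [PySem.List.enumerate_nil, bspec]
  | cons v tl ih =>
    intro k s i hs hik
    rw [PySem.List.enumerate_cons, List.foldl_cons, bspec]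
    by_cases h1 : v < s ∧ v ≠ 0
    · have hstep : aStep (s, i) k v = (v, k) := by simp [aStep, h1]
      rw [hstep, ih (k + 1) v k h1.2 (by omega)]
      have hsv : ¬ s ≤ v := by omega
      cases htl : bspec tl with
      | none => simp [h1.2, hsv]
      | some p =>
        obtain ⟨m, j⟩ := p
        by_cases hvm : v ≤ m
        · simp [h1.2, hvm, hsv]
        · have hsm : ¬ s ≤ m := by omega
          simp [h1.2, hvm, hsm, Prod.ext_iff] ; omega
    · by_cases h2 : v = s
      · have hstep : aStep (s, i) k v = (s, i) := by
          simp [aStep, h2, if_neg (by omega : ¬ k < i)]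
        rw [hstep, ih (k + 1) s i hs (by omega)]
        subst h2
        cases htl : bspec tl with
        | none => simp [hs]
        | some p =>
          obtain ⟨m, j⟩ := p
          by_cases hvm : v ≤ m
          · simp [hs, hvm]
          · simp [hs, hvm, Prod.ext_iff] ; omega
      · have hstep : aStep (s, i) k v = (s, i) := by simp [aStep, h1, h2, hs]
        rw [hstep, ih (k + 1) s i hs (by omega)]
        by_cases hv : v = 0
        · subst hv
          cases htl : bspec tl with
          | none => simp
          | some p =>
            obtain ⟨m, j⟩ := p
            by_cases hsm : s ≤ m <;> simp [hsm, Prod.ext_iff] ; omega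
        · have hsv : s < v := by
            rcases lt_trichotomy v s with h | h | h
            · exact absurd ⟨h, hv⟩ h1
            · exact absurd h h2
            · exact h
          cases htl : bspec tl with
          | none => simp [hv, le_of_lt hsv]
          | some p =>
            obtain ⟨m, j⟩ := p
            by_cases hvm : v ≤ m
            · simp [hv, hvm, le_of_lt (lt_of_lt_of_le hsv hvm)] ; omega
            · by_cases hsm : s ≤ m <;> simp [hv, hvm, hsm, Prod.ext_iff] ; omega

-- A's loop over the tail, started in the all-zero state (0, 0)
lemma aloop_zero (ys : List Int) :
    ∀ (k : Int), 0 ≤ k →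
      (PySem.List.enumerate ys k).foldl (fun st p => aStep st p.1 p.2) ((0 : Int), (0 : Int)) =
        (match bspec ys with
         | none => ((0 : Int), (0 : Int))
         | some (m, j) => (m, k + (j : Int))) := by
  induction ys with
  | nil => intro k _; simp [PySem.List.enumerate_nil, bspec]
  | cons v tl ih =>
    intro k hk
    rw [PySem.List.enumerate_cons, List.foldl_cons, bspec]
    by_cases hv : v = 0
    · have hstep : aStep (0, 0) k v = (0, 0) := by
        simp [aStep, hv, if_neg (by omega : ¬ k < (0 : Int))]
      rw [hstep, ih (k + 1) (by omega)]
      subst hv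
      cases htl : bspec tl with
      | none => simp
      | some p =>
        obtain ⟨m, j⟩ := p
        simp [Prod.ext_iff] ; omega
    · have hstep : aStep (0, 0) k v = (v, k) := by
        by_cases hvn : v < 0
        · simp [aStep, hvn, hv]
        · simp [aStep, hvn, hv]
      rw [hstep, aloop_nonzero tl (k + 1) v k hv (by omega)]
      cases htl : bspec tl with
      | none => simp [hv]
      | some p =>
        obtain ⟨m, j⟩ := p
        by_cases hvm : v ≤ m
        · simp [hv, hvm]
        · simp [hv, hvm, Prod.ext_iff] ; omega

-- A's index loop over list_j[1:], rewritten as the enumerate fold over the tail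
lemma aloop_bridge (x : Int) (rest : List Int) (st : Int × Int) :
    (PySem.List.pyRange 1 (1 + (rest.length : Int)) 1).foldl
        (fun st index => aStep st index (PySem.List.pyGetD (x :: rest) index 0)) st =
      (PySem.List.enumerate rest 1).foldl (fun st p => aStep st p.1 p.2) st := by
  rw [← PySem.List.map_fst_enumerate rest 1, List.foldl_map]
  apply PySem.List.foldl_congr_mem
  intro acc p hp
  rw [PySem.List.mem_enumerate_iff] at hp
  obtain ⟨k, hk, rfl⟩ := hp
  have : (1 : Int) + (k : Int) = ((k + 1 : Nat) : Int) := by push_cast; omega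
  rw [this, PySem.List.pyGetD_natCast]
  simp [List.getD, hk]

-- the minimum value of a nonempty list is what minD returns
lemma minD_eq_of_isMin (l : List Int) (m : Int) (hne : l ≠ []) (hm : m ∈ l)
    (hlb : ∀ x ∈ l, m ≤ x) : PySem.List.minD l id 0 = m := by
  have h := PySem.List.min?_eq_some_minD l id 0 hne
  have h1 := PySem.List.min?_mem h
  have h2 := PySem.List.min?_id_le h m hm
  have h3 := hlb _ h1
  omega

-- ===== VERDICT (by name: the statement is the Claim_ definition above) =====
theorem get_the_shortest_job_spec : Claim_equal_get_the_shortest_job := by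
  intro list_j _ hpre
  unfold Spec_get_the_shortest_job
  obtain ⟨x, rest, rfl⟩ := List.exists_cons_of_ne_nil hpre
  -- peel the first loop iteration of A: it leaves the initial state (x, 0) unchanged
  have hlen : ((x :: rest).length : Int) = 1 + (rest.length : Int) := by
    simp; omega
  have hx0 : PySem.List.pyGetD (x :: rest) 0 0 = x := by
    simp
  have hA : get_the_shortest_job (x :: rest) =
      (PySem.List.enumerate rest 1).foldl (fun st p => aStep st p.1 p.2) (x, 0) := by
    unfold get_the_shortest_job
    rw [hlen, PySem.List.pyRange_one_cons (by omega), List.foldl_cons, hx0]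
    have hstep : aStep (x, 0) 0 x = (x, 0) := by simp [aStep]
    rw [hstep]
    simp only [zero_add]
    rw [aloop_bridge]
  rw [hA]
  by_cases hx : x = 0
  · subst hx
    rw [aloop_zero rest 1 (by omega)]
    have hfil : (((0 : Int) :: rest).filter (fun v => decide (v ≠ 0))) =
        rest.filter (fun v => decide (v ≠ 0)) := by simp
    cases htl : bspec rest with
    | none =>
      have hall : ∀ a ∈ rest, a = 0 := (bspec_none_iff rest).mp htl
      have hfe : rest.filter (fun v => decide (v ≠ 0)) = [] := by
        simp [List.filter_eq_nil_iff]
        exact hall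
      have hB : get_the_shortest_job_alt ((0 : Int) :: rest) = (0, 0) := by
        unfold get_the_shortest_job_alt
        simp only [hfil, hfe, if_pos, hx0]
      rw [hB]
    | some p =>
      obtain ⟨m, j⟩ := p
      obtain ⟨hm0, hmem, hlb, hidx⟩ := bspec_some rest m j htl
      have hmemf : m ∈ rest.filter (fun v => decide (v ≠ 0)) :=
        List.mem_filter.mpr ⟨hmem, by simp [hm0]⟩
      have hlbf : ∀ y ∈ rest.filter (fun v => decide (v ≠ 0)), m ≤ y := by
        intro y hy
        obtain ⟨h1, h2⟩ := List.mem_filter.mp hy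
        exact hlb y h1 (by simpa using h2)
      have hne : rest.filter (fun v => decide (v ≠ 0)) ≠ [] := by
        intro h; rw [h] at hmemf; exact absurd hmemf (List.not_mem_nil)
      have hB : get_the_shortest_job_alt ((0 : Int) :: rest) = (m, ((j + 1 : Nat) : Int)) := by
        unfold get_the_shortest_job_alt
        simp only [hfil, if_neg hne, minD_eq_of_isMin _ m hne hmemf hlbf,
          PySem.List.index?_cons_of_ne rest (fun e => hm0 e.symm), hidx,
          Option.map_some, Option.getD_some]
      rw [hB]
      simp [Prod.ext_iff]
      omega
  · rw [aloop_nonzero rest 1 x 0 hx (by omega)]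
    have hfil : ((x :: rest).filter (fun v => decide (v ≠ 0))) =
        x :: rest.filter (fun v => decide (v ≠ 0)) := by simp [hx]
    have hne : (x :: rest).filter (fun v => decide (v ≠ 0)) ≠ [] := by
      rw [hfil]; exact List.cons_ne_nil _ _
    cases htl : bspec rest with
    | none =>
      have hall : ∀ a ∈ rest, a = 0 := (bspec_none_iff rest).mp htl
      have hfe : rest.filter (fun v => decide (v ≠ 0)) = [] := by
        simp [List.filter_eq_nil_iff]
        exact hall
      have hmin : PySem.List.minD ((x :: rest).filter (fun v => decide (v ≠ 0))) id 0 = x := by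
        apply minD_eq_of_isMin _ _ hne
        · rw [hfil]; exact List.mem_cons_self
        · intro y hy; rw [hfil, hfe] at hy; simp at hy; omega
      have hB : get_the_shortest_job_alt (x :: rest) = (x, 0) := by
        unfold get_the_shortest_job_alt
        simp only [if_neg hne, hmin, PySem.List.index?_cons_self, Option.getD_some]
        rfl
      rw [hB]
    | some p =>
      obtain ⟨m, j⟩ := p
      obtain ⟨hm0, hmem, hlb, hidx⟩ := bspec_some rest m j htl
      by_cases hxm : x ≤ m
      · have hmin : PySem.List.minD ((x :: rest).filter (fun v => decide (v ≠ 0))) id 0 = x := by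
          apply minD_eq_of_isMin _ _ hne
          · rw [hfil]; exact List.mem_cons_self
          · intro y hy; rw [hfil] at hy
            rcases List.mem_cons.mp hy with h | h
            · omega
            · obtain ⟨h1, h2⟩ := List.mem_filter.mp h
              exact le_trans hxm (hlb y h1 (by simpa using h2))
        have hB : get_the_shortest_job_alt (x :: rest) = (x, 0) := by
          unfold get_the_shortest_job_alt
          simp only [if_neg hne, hmin, PySem.List.index?_cons_self, Option.getD_some]
          rfl
        rw [hB]
        simp [hxm]
      · have hmin : PySem.List.minD ((x :: rest).filter (fun v => decide (v ≠ 0))) id 0 = m := by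
          apply minD_eq_of_isMin _ _ hne
          · rw [hfil]
            exact List.mem_cons_of_mem _ (List.mem_filter.mpr ⟨hmem, by simp [hm0]⟩)
          · intro y hy; rw [hfil] at hy
            rcases List.mem_cons.mp hy with h | h
            · omega
            · obtain ⟨h1, h2⟩ := List.mem_filter.mp h
              exact hlb y h1 (by simpa using h2)
        have hB : get_the_shortest_job_alt (x :: rest) = (m, ((j + 1 : Nat) : Int)) := by
          unfold get_the_shortest_job_alt
          simp only [if_neg hne, hmin,
            PySem.List.index?_cons_of_ne rest (fun e => hxm (le_of_eq e)), hidx,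
            Option.map_some, Option.getD_some]
        rw [hB]
        simp [hxm, Prod.ext_iff]
        omega
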